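-- pv_equiv track=rewrite | github.com/LaurDo/Pw_Strength_Checker | pw_checker.py | is_pw_case_sensitive
-- ===== SOURCE A (Python) =====
-- def is_pw_case_sensitive(pw) -> bool:
--     upper = 0
--     lower = 0
--     for char in pw:
--         if char.isupper():
--             upper+=1
--         elif char.islower():
--             lower+=1
--
--     if upper>0 and lower>0:
--         return True
--     else:
--         return False
-- ===== SOURCE B (Python) =====
-- def is_pw_case_sensitive(pw) -> bool:
--     return any(c.isupper() for c in pw) and any(c.islower() for c in pw)
-- ===== Notes on version B (the rewrite author's own statement) =====
-- stated objective: idiomatic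
-- what changed: Replaces the single counting loop with two counters and a final threshold test by two independent short-circuiting any() existence scans combined with boolean and.
import Mathlib
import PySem

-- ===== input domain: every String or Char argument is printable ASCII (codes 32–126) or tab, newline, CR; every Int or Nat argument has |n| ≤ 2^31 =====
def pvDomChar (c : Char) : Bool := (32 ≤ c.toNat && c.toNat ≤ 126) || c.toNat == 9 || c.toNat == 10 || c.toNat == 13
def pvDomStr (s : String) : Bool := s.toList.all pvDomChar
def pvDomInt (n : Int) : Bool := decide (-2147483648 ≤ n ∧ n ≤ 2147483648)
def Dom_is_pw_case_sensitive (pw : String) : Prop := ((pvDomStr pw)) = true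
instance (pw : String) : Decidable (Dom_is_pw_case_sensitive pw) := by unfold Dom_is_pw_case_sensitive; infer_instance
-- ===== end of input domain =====

-- B replaces A's single counting loop by two independent existence scans (idiomatic any/and).

-- ===== PORT A =====
-- one pass accumulating (upper, lower) counters, then threshold test
def is_pw_case_sensitive (pw : String) : Bool :=
  let st := pw.toList.foldl
    (fun (st : Int × Int) c =>
      if PySem.Chars.isupper c then (st.1 + 1, st.2)
      else if PySem.Chars.islower c then (st.1, st.2 + 1)
      else st) (0, 0)
  if st.1 > 0 ∧ st.2 > 0 then true else false

-- ===== PORT B =====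
def is_pw_case_sensitive_alt (pw : String) : Bool :=
  pw.toList.any PySem.Chars.isupper && pw.toList.any PySem.Chars.islower

-- ===== PRECONDITION & SPEC =====
def Spec_is_pw_case_sensitive (pw : String) (out : Bool) : Prop := out = is_pw_case_sensitive_alt pw
instance (pw : String) (out : Bool) : Decidable (Spec_is_pw_case_sensitive pw out) := by unfold Spec_is_pw_case_sensitive; infer_instance

-- ===== CLAIM (what is proved, stated in full; the proofs are below) =====
def Claim_equal_is_pw_case_sensitive : Prop := ∀ (pw : String), Dom_is_pw_case_sensitive pw → Spec_is_pw_case_sensitive pw (is_pw_case_sensitive pw)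

-- ===== LEMMAS AND PROOFS =====

-- a character cannot be both uppercase and lowercase
lemma upper_not_lower (c : Char) (h : PySem.Chars.isupper c = true) : PySem.Chars.islower c = false := by
  simp only [PySem.Chars.isupper, Bool.and_eq_true, decide_eq_true_eq] at h
  simp only [PySem.Chars.islower, Bool.and_eq_false_iff, decide_eq_false_iff_not]
  left
  intro hc
  exact absurd (le_trans hc h.2) (by decide)

-- invariant of A's loop: the counters only grow, and each becomes positive iff it started
-- positive or a character of that class occurs
lemma pw_fold_pos (l : List Char) (u v : Int) (hu0 : 0 ≤ u) (hv0 : 0 ≤ v) :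
    (l.foldl
      (fun (st : Int × Int) c =>
        if PySem.Chars.isupper c then (st.1 + 1, st.2)
        else if PySem.Chars.islower c then (st.1, st.2 + 1)
        else st) (u, v)).1 > 0 ∧
    (l.foldl
      (fun (st : Int × Int) c =>
        if PySem.Chars.isupper c then (st.1 + 1, st.2)
        else if PySem.Chars.islower c then (st.1, st.2 + 1)
        else st) (u, v)).2 > 0
    ↔ (u > 0 ∨ l.any PySem.Chars.isupper) ∧ (v > 0 ∨ l.any PySem.Chars.islower) := by
  induction l generalizing u v with
  | nil => simp
  | cons c t ih =>
    simp only [List.foldl_cons, List.any_cons]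
    by_cases hu : PySem.Chars.isupper c
    · have hl : PySem.Chars.islower c = false := upper_not_lower c hu
      simp only [if_pos hu, if_neg (by simp [hl] : ¬ PySem.Chars.islower c = true)]
      rw [ih (u + 1) v (by omega) hv0]
      simp only [hu, hl, Bool.true_or, Bool.false_or]
      simp [show u + 1 > 0 from by omega]
    · by_cases hl : PySem.Chars.islower c
      · simp only [if_neg hu, if_pos hl]
        rw [ih u (v + 1) hu0 (by omega)]
        simp only [hl, Bool.true_or]
        simp only [show PySem.Chars.isupper c = false from Bool.not_eq_true _ ▸ eq_false_of_ne_true hu, Bool.false_or]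
        simp [show v + 1 > 0 from by omega]
      · simp only [if_neg hu, if_neg hl]
        rw [ih u v hu0 hv0]
        simp only [show PySem.Chars.isupper c = false from eq_false_of_ne_true hu,
          show PySem.Chars.islower c = false from eq_false_of_ne_true hl, Bool.false_or]

-- ===== VERDICT (by name: the statement is the Claim_ definition above) =====
theorem is_pw_case_sensitive_spec : Claim_equal_is_pw_case_sensitive := by
  intro pw _
  unfold Spec_is_pw_case_sensitive is_pw_case_sensitive is_pw_case_sensitive_alt
  dsimp only []
  have h := pw_fold_pos pw.toList 0 0 le_rfl le_rfl
  simp only [show ¬((0:Int) > 0) from by omega, false_or] at h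
  split_ifs with hp
  · have := h.mp hp
    simp [this.1, this.2]
  · have : ¬(pw.toList.any PySem.Chars.isupper = true ∧ pw.toList.any PySem.Chars.islower = true) :=
      fun hc => hp (h.mpr hc)
    rcases not_and_or.mp this with h' | h' <;> simp [h']
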